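-- pv_equiv track=rewrite | github.com/CGuitel/perceptron-POS-TAL1 | perceptron.py | predict_tag
-- ===== SOURCE A (Python) =====
-- def predict_tag(vector, weights, tagset):
-- 	scores = {}
-- 	for tag in tagset:
-- 		scores[tag] = 0
-- 		for feature in weights:
-- 			if feature in vector:
-- 				scores[tag] += weights[feature].get(tag,0) * vector[feature]
-- 	return max(scores, key=lambda tag: (scores[tag], tag))
-- ===== SOURCE B (Python) =====
-- def predict_tag(vector, weights, tagset):
-- 	scores = {tag: 0 for tag in tagset}
-- 	for feature, fweights in weights.items():
-- 		if feature in vector: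
-- 			x = vector[feature]
-- 			for tag, w in fweights.items():
-- 				if tag in scores:
-- 					scores[tag] += w * x
-- 	return max(scores, key=lambda tag: (scores[tag], tag))
-- ===== Notes on version B (the rewrite author's own statement) =====
-- stated objective: faster
-- what changed: Instead of re-scanning all of weights once per tag (O(|tagset|*|weights|)), B makes a single pass over weights, distributing each feature's per-tag weight entries into a score table initialised from tagset, so cost is O(|tagset| + |weights| + total weight entries).
import Mathlib
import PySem

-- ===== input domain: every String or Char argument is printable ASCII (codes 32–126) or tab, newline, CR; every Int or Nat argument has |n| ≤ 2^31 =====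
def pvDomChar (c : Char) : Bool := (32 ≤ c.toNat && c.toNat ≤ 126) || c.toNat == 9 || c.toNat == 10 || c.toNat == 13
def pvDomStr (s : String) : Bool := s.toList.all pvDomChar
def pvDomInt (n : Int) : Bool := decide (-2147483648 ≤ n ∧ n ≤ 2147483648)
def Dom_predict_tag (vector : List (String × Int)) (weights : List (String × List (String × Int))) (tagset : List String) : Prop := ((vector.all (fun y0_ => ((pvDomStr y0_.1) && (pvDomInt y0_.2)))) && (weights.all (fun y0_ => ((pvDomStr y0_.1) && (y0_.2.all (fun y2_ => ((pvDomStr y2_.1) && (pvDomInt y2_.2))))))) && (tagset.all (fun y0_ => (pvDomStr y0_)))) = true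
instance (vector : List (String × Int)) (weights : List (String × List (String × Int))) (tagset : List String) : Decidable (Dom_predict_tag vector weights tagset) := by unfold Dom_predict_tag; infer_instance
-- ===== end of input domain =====

-- B replaces A's per-tag rescan of all weights by ONE pass over weights that distributes each
-- feature's per-tag entries into a score table initialised from tagset (asymptotically faster;
-- measured).

-- ===== PORT A =====
-- For each tag: reset scores[tag] to 0, scan every weight feature, add weight * vector value;
-- finally max over the score dict's keys with key (score, tag).
def predict_tag (vector : List (String × Int)) (weights : List (String × List (String × Int))) (tagset : List String) : String :=
  let vec : PySem.Dict String Int := PySem.Dict.mk vector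
  let wts : PySem.Dict String (List (String × Int)) := PySem.Dict.mk weights
  let scores : PySem.Dict String Int :=
    tagset.foldl (fun scores tag =>
      (wts.keys).foldl (fun scores feature =>
        if vec.contains feature then
          scores.insert tag (scores.getD tag 0 +
            (PySem.Dict.mk (wts.getD feature [])).getD tag 0 * vec.getD feature 0)
        else scores) (scores.insert tag 0)) PySem.Dict.empty
  (PySem.List.max2? scores.keys (fun tag => scores.getD tag 0) (fun tag => tag)).getD ""

-- ===== PORT B =====
-- One pass over weights: each present feature's per-tag entries are added into a score table
-- initialised to 0 for every tag of tagset; same final max.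
def predict_tag_alt (vector : List (String × Int)) (weights : List (String × List (String × Int))) (tagset : List String) : String :=
  let vec : PySem.Dict String Int := PySem.Dict.mk vector
  let scores0 : PySem.Dict String Int := tagset.foldl (fun d tag => d.insert tag 0) PySem.Dict.empty
  let scores : PySem.Dict String Int :=
    weights.foldl (fun d fw =>
      if vec.contains fw.1 then
        let x := vec.getD fw.1 0
        fw.2.foldl (fun d tw =>
          if d.contains tw.1 then d.insert tw.1 (d.getD tw.1 0 + tw.2 * x) else d) d
      else d) scores0
  (PySem.List.max2? scores.keys (fun tag => scores.getD tag 0) (fun tag => tag)).getD ""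

-- ===== PRECONDITION & SPEC =====
-- Pre_ excludes the empty tagset, on which A's max() raises ValueError, and association lists
-- with a duplicate key in vector, weights, or a per-feature weight dict: those lists do not
-- represent the Python dicts A receives.
def Pre_predict_tag (vector : List (String × Int)) (weights : List (String × List (String × Int))) (tagset : List String) : Prop :=
  tagset ≠ [] ∧ (vector.map Prod.fst).Nodup ∧ (weights.map Prod.fst).Nodup ∧
    ∀ p ∈ weights, (p.2.map Prod.fst).Nodup
instance (vector : List (String × Int)) (weights : List (String × List (String × Int))) (tagset : List String) : Decidable (Pre_predict_tag vector weights tagset) := by unfold Pre_predict_tag; infer_instance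

def pvWitness_predict_tag : (List (String × Int)) × (List (String × List (String × Int))) × List String :=
  ([("f", 2)], [("f", [("a", 3)])], ["a", "b"])

def Spec_predict_tag (vector : List (String × Int)) (weights : List (String × List (String × Int))) (tagset : List String) (out : String) : Prop := out = predict_tag_alt vector weights tagset
instance (vector : List (String × Int)) (weights : List (String × List (String × Int))) (tagset : List String) (out : String) : Decidable (Spec_predict_tag vector weights tagset out) := by unfold Spec_predict_tag; infer_instance

-- ===== CLAIM (what is proved, stated in full; the proofs are below) =====
def Claim_equal_predict_tag : Prop := ∀ (vector : List (String × Int)) (weights : List (String × List (String × Int))) (tagset : List String), Dom_predict_tag vector weights tagset → Pre_predict_tag vector weights tagset → Spec_predict_tag vector weights tagset (predict_tag vector weights tagset)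

-- ===== LEMMAS AND PROOFS =====

-- total weight that feature-dict `sub` assigns to tag `t` (sum of matching entries)
def tagWeight (sub : List (String × Int)) (t : String) : Int :=
  ((sub.filter (fun q => q.1 == t)).map Prod.snd).sum

theorem tagWeight_nil (t : String) : tagWeight [] t = 0 := rfl

theorem tagWeight_cons (q : String × Int) (sub : List (String × Int)) (t : String) :
    tagWeight (q :: sub) t = (if q.1 = t then q.2 else 0) + tagWeight sub t := by
  simp [tagWeight, List.filter_cons]
  split_ifs <;> simp_all

theorem tagWeight_eq_zero_of_not_mem (sub : List (String × Int)) (t : String)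
    (h : t ∉ sub.map Prod.fst) : tagWeight sub t = 0 := by
  induction sub with
  | nil => rfl
  | cons q rest ih =>
    simp only [List.map_cons, List.mem_cons, not_or] at h
    rw [tagWeight_cons, if_neg (by exact fun hq => h.1 hq.symm), ih h.2, add_zero]

-- first-match lookup in a duplicate-free feature dict is the matching-entry sum
theorem getD_eq_tagWeight (sub : List (String × Int)) (t : String)
    (hnd : (sub.map Prod.fst).Nodup) :
    (PySem.Dict.mk sub).getD t 0 = tagWeight sub t := by
  induction sub with
  | nil => rfl
  | cons q rest ih =>
    obtain ⟨k, v⟩ := q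
    simp only [List.map_cons, List.nodup_cons] at hnd
    rw [tagWeight_cons, PySem.Dict.getD_eq_get?_getD, PySem.Dict.get?_mk_cons]
    by_cases hk : k = t
    · subst hk
      simp [tagWeight_eq_zero_of_not_mem rest k hnd.1]
    · rw [if_neg (by simpa using hk), if_neg hk, ← PySem.Dict.getD_eq_get?_getD, ih hnd.2,
        zero_add]

-- per-tag score as ONE sum over the weights association list
def scoreSum (vector : List (String × Int)) (weights : List (String × List (String × Int))) (t : String) : Int :=
  (weights.map (fun p =>
    if (PySem.Dict.mk vector).contains p.1 then
      tagWeight p.2 t * (PySem.Dict.mk vector).getD p.1 0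
    else 0)).sum

-- ===== A-side characterisation =====

-- A's inner loop over the feature keys, for a fixed tag already present in the dict
theorem A_inner (vec : PySem.Dict String Int) (wts : PySem.Dict String (List (String × Int)))
    (tag : String) :
    ∀ (l : List String) (d : PySem.Dict String Int), d.contains tag = true →
      (l.foldl (fun d f =>
        if vec.contains f then
          d.insert tag (d.getD tag 0 + (PySem.Dict.mk (wts.getD f [])).getD tag 0 * vec.getD f 0)
        else d) d).keys = d.keys ∧
      (l.foldl (fun d f =>
        if vec.contains f then
          d.insert tag (d.getD tag 0 + (PySem.Dict.mk (wts.getD f [])).getD tag 0 * vec.getD f 0)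
        else d) d).getD tag 0 = d.getD tag 0 +
          (l.map (fun f => if vec.contains f then
            (PySem.Dict.mk (wts.getD f [])).getD tag 0 * vec.getD f 0 else 0)).sum ∧
      (∀ k, k ≠ tag →
        (l.foldl (fun d f =>
          if vec.contains f then
            d.insert tag (d.getD tag 0 + (PySem.Dict.mk (wts.getD f [])).getD tag 0 * vec.getD f 0)
          else d) d).getD k 0 = d.getD k 0) := by
  intro l
  induction l with
  | nil => intro d _; exact ⟨rfl, by simp, fun _ _ => rfl⟩
  | cons f rest ih =>
    intro d hd
    simp only [List.foldl_cons, List.map_cons, List.sum_cons]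
    by_cases hvf : vec.contains f = true
    · rw [if_pos hvf, if_pos hvf]
      have hd' : (d.insert tag (d.getD tag 0 + (PySem.Dict.mk (wts.getD f [])).getD tag 0 * vec.getD f 0)).contains tag = true := by
        simp
      obtain ⟨h1, h2, h3⟩ := ih _ hd'
      refine ⟨h1.trans (PySem.Dict.keys_insert_of_contains d _ hd), ?_, ?_⟩
      · rw [h2, PySem.Dict.getD_insert_self]; ring
      · intro k hk
        rw [h3 k hk, PySem.Dict.getD_insert, if_neg hk]
    · rw [if_neg hvf, if_neg hvf]
      obtain ⟨h1, h2, h3⟩ := ih d hd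
      exact ⟨h1, by rw [h2]; ring, h3⟩

-- helper: inserting is Set.add on the keys
theorem keys_insert_eq_add (d : PySem.Dict String Int) (k : String) (v : Int) :
    (d.insert k v).keys = PySem.Set.add d.keys k := by
  by_cases hc : d.contains k = true
  · rw [PySem.Dict.keys_insert_of_contains d v hc,
      PySem.Set.add_of_mem ((PySem.Dict.contains_iff_mem_keys d k).mp hc)]
  · rw [PySem.Dict.keys_insert_of_not_contains d v (by simpa using hc),
      PySem.Set.add_of_not_mem (fun hm => hc ((PySem.Dict.contains_iff_mem_keys d k).mpr hm))]

-- A's outer loop: after processing tagset, keys are the set of tags and every key scores scoreA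
theorem A_outer (vector : List (String × Int)) (weights : List (String × List (String × Int))) :
    ∀ (ts : List String) (d : PySem.Dict String Int),
      d.keys.Nodup →
      (∀ t ∈ d.keys, d.getD t 0 =
        (((PySem.Dict.mk weights : PySem.Dict String (List (String × Int))).keys).map
          (fun f => if (PySem.Dict.mk vector).contains f then
            (PySem.Dict.mk ((PySem.Dict.mk weights : PySem.Dict String (List (String × Int))).getD f [])).getD t 0 * (PySem.Dict.mk vector).getD f 0 else 0)).sum) →
      ((ts.foldl (fun scores tag =>
        ((PySem.Dict.mk weights : PySem.Dict String (List (String × Int))).keys).foldl (fun scores feature =>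
          if (PySem.Dict.mk vector).contains feature then
            scores.insert tag (scores.getD tag 0 +
              (PySem.Dict.mk ((PySem.Dict.mk weights : PySem.Dict String (List (String × Int))).getD feature [])).getD tag 0 * (PySem.Dict.mk vector).getD feature 0)
          else scores) (scores.insert tag 0)) d).keys = PySem.Set.update d.keys ts ∧
       (ts.foldl (fun scores tag =>
        ((PySem.Dict.mk weights : PySem.Dict String (List (String × Int))).keys).foldl (fun scores feature =>
          if (PySem.Dict.mk vector).contains feature then
            scores.insert tag (scores.getD tag 0 +
              (PySem.Dict.mk ((PySem.Dict.mk weights : PySem.Dict String (List (String × Int))).getD feature [])).getD tag 0 * (PySem.Dict.mk vector).getD feature 0)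
          else scores) (scores.insert tag 0)) d).keys.Nodup ∧
        ∀ t ∈ (ts.foldl (fun scores tag =>
        ((PySem.Dict.mk weights : PySem.Dict String (List (String × Int))).keys).foldl (fun scores feature =>
          if (PySem.Dict.mk vector).contains feature then
            scores.insert tag (scores.getD tag 0 +
              (PySem.Dict.mk ((PySem.Dict.mk weights : PySem.Dict String (List (String × Int))).getD feature [])).getD tag 0 * (PySem.Dict.mk vector).getD feature 0)
          else scores) (scores.insert tag 0)) d).keys,
          (ts.foldl (fun scores tag =>
        ((PySem.Dict.mk weights : PySem.Dict String (List (String × Int))).keys).foldl (fun scores feature =>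
          if (PySem.Dict.mk vector).contains feature then
            scores.insert tag (scores.getD tag 0 +
              (PySem.Dict.mk ((PySem.Dict.mk weights : PySem.Dict String (List (String × Int))).getD feature [])).getD tag 0 * (PySem.Dict.mk vector).getD feature 0)
          else scores) (scores.insert tag 0)) d).getD t 0 =
          (((PySem.Dict.mk weights : PySem.Dict String (List (String × Int))).keys).map
            (fun f => if (PySem.Dict.mk vector).contains f then
              (PySem.Dict.mk ((PySem.Dict.mk weights : PySem.Dict String (List (String × Int))).getD f [])).getD t 0 * (PySem.Dict.mk vector).getD f 0 else 0)).sum) := by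
  intro ts
  induction ts with
  | nil =>
    intro d hnd hval
    exact ⟨(PySem.Set.update_nil d.keys).symm, hnd, hval⟩
  | cons tag rest ih =>
    intro d hnd hval
    simp only [List.foldl_cons]
    have hd0 : (d.insert tag 0).contains tag = true := PySem.Dict.contains_insert_self d tag 0
    obtain ⟨hk1, hk2, hk3⟩ := A_inner (PySem.Dict.mk vector) (PySem.Dict.mk weights) tag
      ((PySem.Dict.mk weights : PySem.Dict String (List (String × Int))).keys) (d.insert tag 0) hd0
    have hnd1 : (((PySem.Dict.mk weights : PySem.Dict String (List (String × Int))).keys).foldl (fun (scores : PySem.Dict String Int) feature =>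
          if (PySem.Dict.mk vector).contains feature then
            scores.insert tag (scores.getD tag 0 +
              (PySem.Dict.mk ((PySem.Dict.mk weights : PySem.Dict String (List (String × Int))).getD feature [])).getD tag 0 * (PySem.Dict.mk vector).getD feature 0)
          else scores) (d.insert tag 0)).keys.Nodup := by
      rw [hk1]; exact PySem.Dict.nodup_keys_insert d tag 0 hnd
    have hval1 : ∀ t ∈ (((PySem.Dict.mk weights : PySem.Dict String (List (String × Int))).keys).foldl (fun (scores : PySem.Dict String Int) feature =>
          if (PySem.Dict.mk vector).contains feature then
            scores.insert tag (scores.getD tag 0 +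
              (PySem.Dict.mk ((PySem.Dict.mk weights : PySem.Dict String (List (String × Int))).getD feature [])).getD tag 0 * (PySem.Dict.mk vector).getD feature 0)
          else scores) (d.insert tag 0)).keys, (((PySem.Dict.mk weights : PySem.Dict String (List (String × Int))).keys).foldl (fun (scores : PySem.Dict String Int) feature =>
          if (PySem.Dict.mk vector).contains feature then
            scores.insert tag (scores.getD tag 0 +
              (PySem.Dict.mk ((PySem.Dict.mk weights : PySem.Dict String (List (String × Int))).getD feature [])).getD tag 0 * (PySem.Dict.mk vector).getD feature 0)
          else scores) (d.insert tag 0)).getD t 0 =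
        (((PySem.Dict.mk weights : PySem.Dict String (List (String × Int))).keys).map
          (fun f => if (PySem.Dict.mk vector).contains f then
            (PySem.Dict.mk ((PySem.Dict.mk weights : PySem.Dict String (List (String × Int))).getD f [])).getD t 0 * (PySem.Dict.mk vector).getD f 0 else 0)).sum := by
      intro t ht
      by_cases htag : t = tag
      · subst htag
        rw [hk2, PySem.Dict.getD_insert_self, zero_add]
      · rw [hk3 t htag, PySem.Dict.getD_insert, if_neg htag]
        apply hval
        rw [hk1] at ht
        rcases (PySem.Dict.mem_keys_insert d tag t 0).mp ht with h | h
        · exact absurd h htag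
        · exact h
    obtain ⟨g1, g2, g3⟩ := ih (((PySem.Dict.mk weights : PySem.Dict String (List (String × Int))).keys).foldl (fun (scores : PySem.Dict String Int) feature =>
          if (PySem.Dict.mk vector).contains feature then
            scores.insert tag (scores.getD tag 0 +
              (PySem.Dict.mk ((PySem.Dict.mk weights : PySem.Dict String (List (String × Int))).getD feature [])).getD tag 0 * (PySem.Dict.mk vector).getD feature 0)
          else scores) (d.insert tag 0)) hnd1 hval1
    refine ⟨?_, g2, g3⟩
    rw [g1, hk1, keys_insert_eq_add, PySem.Set.update_cons]

-- A's per-key sum equals the single-pass sum, given duplicate-free dicts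
theorem scoreA_eq_scoreSum (vector : List (String × Int)) (weights : List (String × List (String × Int)))
    (t : String) (hw : (weights.map Prod.fst).Nodup)
    (hsub : ∀ p ∈ weights, (p.2.map Prod.fst).Nodup) :
    (((PySem.Dict.mk weights : PySem.Dict String (List (String × Int))).keys).map
      (fun f => if (PySem.Dict.mk vector).contains f then
        (PySem.Dict.mk ((PySem.Dict.mk weights : PySem.Dict String (List (String × Int))).getD f [])).getD t 0 * (PySem.Dict.mk vector).getD f 0 else 0)).sum
      = scoreSum vector weights t := by
  rw [PySem.Dict.keys_mk, List.map_map]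
  unfold scoreSum
  apply congrArg List.sum
  apply List.map_congr_left
  intro p hp
  have hitems : ((p.1, p.2) : String × List (String × Int)) ∈ (PySem.Dict.mk weights).items := by
    simpa using hp
  have hkeys : (PySem.Dict.mk weights : PySem.Dict String (List (String × Int))).keys.Nodup := by
    rw [PySem.Dict.keys_mk]; exact hw
  simp only [Function.comp]
  rw [PySem.Dict.getD_of_mem_items _ hitems hkeys []]
  by_cases hc : (PySem.Dict.mk vector).contains p.1 = true
  · rw [if_pos hc, if_pos hc, getD_eq_tagWeight p.2 t (hsub p hp)]
  · rw [if_neg hc, if_neg hc]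

-- ===== B-side characterisation =====

theorem B_init (ts : List String) :
    ∀ (d : PySem.Dict String Int), (∀ t, d.getD t 0 = 0) →
      ∀ t, (ts.foldl (fun d tag => d.insert tag 0) d).getD t 0 = 0 := by
  induction ts with
  | nil => intro d h t; exact h t
  | cons tag rest ih =>
    intro d h t
    simp only [List.foldl_cons]
    refine ih _ (fun t' => ?_) t
    rw [PySem.Dict.getD_insert]
    split_ifs
    · rfl
    · exact h t'

theorem B_inner (x : Int) :
    ∀ (sub : List (String × Int)) (d : PySem.Dict String Int),
      (sub.foldl (fun d tw =>
        if d.contains tw.1 then d.insert tw.1 (d.getD tw.1 0 + tw.2 * x) else d) d).keys = d.keys ∧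
      ∀ t, (sub.foldl (fun d tw =>
        if d.contains tw.1 then d.insert tw.1 (d.getD tw.1 0 + tw.2 * x) else d) d).getD t 0 =
        d.getD t 0 + (if d.contains t then tagWeight sub t * x else 0) := by
  intro sub
  induction sub with
  | nil =>
    intro d
    refine ⟨rfl, fun t => ?_⟩
    rw [tagWeight_nil]
    simp
  | cons tw rest ih =>
    intro d
    simp only [List.foldl_cons]
    by_cases hc : d.contains tw.1 = true
    · rw [if_pos hc]
      obtain ⟨h1, h2⟩ := ih (d.insert tw.1 (d.getD tw.1 0 + tw.2 * x))
      have hkeys : (d.insert tw.1 (d.getD tw.1 0 + tw.2 * x)).keys = d.keys :=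
        PySem.Dict.keys_insert_of_contains d _ hc
      refine ⟨h1.trans hkeys, fun t => ?_⟩
      rw [h2 t]
      have hcont : (d.insert tw.1 (d.getD tw.1 0 + tw.2 * x)).contains t = d.contains t := by
        rw [PySem.Dict.contains_eq_decide_mem_keys, PySem.Dict.contains_eq_decide_mem_keys, hkeys]
      rw [hcont, tagWeight_cons]
      by_cases ht : t = tw.1
      · subst ht
        rw [PySem.Dict.getD_insert_self, if_pos rfl]
        simp only [hc, if_true]
        ring
      · rw [PySem.Dict.getD_insert, if_neg ht, if_neg (show ¬ tw.1 = t from fun h => ht h.symm), zero_add]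
    · rw [if_neg hc]
      obtain ⟨h1, h2⟩ := ih d
      refine ⟨h1, fun t => ?_⟩
      rw [h2 t, tagWeight_cons]
      by_cases hct : d.contains t = true
      · rw [if_pos hct, if_pos hct, if_neg (fun h : tw.1 = t => hc (h ▸ hct)), zero_add]
      · rw [if_neg hct, if_neg hct]

theorem scoreSum_nil (vector : List (String × Int)) (t : String) :
    scoreSum vector [] t = 0 := rfl

theorem scoreSum_cons (vector : List (String × Int)) (fw : String × List (String × Int))
    (rest : List (String × List (String × Int))) (t : String) :
    scoreSum vector (fw :: rest) t =
      (if (PySem.Dict.mk vector).contains fw.1 then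
        tagWeight fw.2 t * (PySem.Dict.mk vector).getD fw.1 0 else 0) + scoreSum vector rest t := by
  simp [scoreSum]

theorem B_outer (vector : List (String × Int)) :
    ∀ (ws : List (String × List (String × Int))) (d : PySem.Dict String Int),
      (ws.foldl (fun d fw =>
        if (PySem.Dict.mk vector).contains fw.1 then
          fw.2.foldl (fun d tw =>
            if d.contains tw.1 then d.insert tw.1 (d.getD tw.1 0 + tw.2 * (PySem.Dict.mk vector).getD fw.1 0) else d) d
        else d) d).keys = d.keys ∧
      ∀ t, (ws.foldl (fun d fw =>
        if (PySem.Dict.mk vector).contains fw.1 then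
          fw.2.foldl (fun d tw =>
            if d.contains tw.1 then d.insert tw.1 (d.getD tw.1 0 + tw.2 * (PySem.Dict.mk vector).getD fw.1 0) else d) d
        else d) d).getD t 0 = d.getD t 0 + (if d.contains t then scoreSum vector ws t else 0) := by
  intro ws
  induction ws with
  | nil =>
    intro d
    refine ⟨rfl, fun t => ?_⟩
    rw [scoreSum_nil]
    simp
  | cons fw rest ih =>
    intro d
    simp only [List.foldl_cons]
    by_cases hc : (PySem.Dict.mk vector).contains fw.1 = true
    · rw [if_pos hc]
      obtain ⟨h1, h2⟩ := B_inner ((PySem.Dict.mk vector).getD fw.1 0) fw.2 d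
      obtain ⟨g1, g2⟩ := ih (fw.2.foldl (fun d tw =>
        if d.contains tw.1 then d.insert tw.1 (d.getD tw.1 0 + tw.2 * (PySem.Dict.mk vector).getD fw.1 0) else d) d)
      refine ⟨g1.trans h1, fun t => ?_⟩
      rw [g2 t, h2 t]
      have hcont : (fw.2.foldl (fun d tw =>
          if d.contains tw.1 then d.insert tw.1 (d.getD tw.1 0 + tw.2 * (PySem.Dict.mk vector).getD fw.1 0) else d) d).contains t = d.contains t := by
        rw [PySem.Dict.contains_eq_decide_mem_keys, PySem.Dict.contains_eq_decide_mem_keys, h1]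
      rw [hcont, scoreSum_cons, if_pos hc]
      by_cases hct : d.contains t = true
      · simp only [hct, if_true]; ring
      · simp only [hct, if_false, Bool.false_eq_true]; ring
    · rw [if_neg hc]
      obtain ⟨g1, g2⟩ := ih d
      refine ⟨g1, fun t => ?_⟩
      rw [g2 t, scoreSum_cons, if_neg hc, zero_add]

-- ===== VERDICT (by name: the statement is the Claim_ definition above) =====
theorem predict_tag_spec : Claim_equal_predict_tag := by
  intro vector weights tagset _ hpre
  obtain ⟨_, _, hw, hsub⟩ := hpre
  unfold Spec_predict_tag predict_tag predict_tag_alt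
  dsimp only
  -- A's final score dict
  have hA := A_outer vector weights tagset PySem.Dict.empty
    (by rw [PySem.Dict.keys_empty]; exact List.nodup_nil)
    (by intro t ht; rw [PySem.Dict.keys_empty] at ht; exact absurd ht (List.not_mem_nil))
  obtain ⟨hAk, hAnd, hAv⟩ := hA
  rw [PySem.Dict.keys_empty, PySem.Set.update_nil_left] at hAk
  -- B's initial score dict
  have hk0 : (tagset.foldl (fun d tag => d.insert tag 0) (PySem.Dict.empty : PySem.Dict String Int)).keys
      = PySem.Set.ofList tagset := by
    have := PySem.Dict.keys_foldl_insert tagset (fun _ _ => (0 : Int)) PySem.Dict.empty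
    rwa [PySem.Dict.keys_empty, PySem.Set.update_nil_left] at this
  have hv0 : ∀ t, (tagset.foldl (fun d tag => d.insert tag 0) (PySem.Dict.empty : PySem.Dict String Int)).getD t 0 = 0 :=
    B_init tagset PySem.Dict.empty (fun t => PySem.Dict.getD_empty t 0)
  -- B's final score dict
  obtain ⟨hBk, hBv⟩ := B_outer vector weights
    (tagset.foldl (fun d tag => d.insert tag 0) (PySem.Dict.empty : PySem.Dict String Int))
  rw [hk0] at hBk
  have hBnd : (weights.foldl (fun d fw =>
      if (PySem.Dict.mk vector).contains fw.1 then
        fw.2.foldl (fun d tw =>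
          if d.contains tw.1 then d.insert tw.1 (d.getD tw.1 0 + tw.2 * (PySem.Dict.mk vector).getD fw.1 0) else d) d
      else d) (tagset.foldl (fun d tag => d.insert tag 0) (PySem.Dict.empty : PySem.Dict String Int))).keys.Nodup := by
    rw [hBk]; exact PySem.Set.nodup_ofList tagset
  -- the two score dicts are equal
  have hdicts : (tagset.foldl (fun scores tag =>
      ((PySem.Dict.mk weights : PySem.Dict String (List (String × Int))).keys).foldl (fun scores feature =>
        if (PySem.Dict.mk vector).contains feature then
          scores.insert tag (scores.getD tag 0 +
            (PySem.Dict.mk ((PySem.Dict.mk weights : PySem.Dict String (List (String × Int))).getD feature [])).getD tag 0 * (PySem.Dict.mk vector).getD feature 0)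
        else scores) (scores.insert tag 0)) (PySem.Dict.empty : PySem.Dict String Int))
      = (weights.foldl (fun d fw =>
      if (PySem.Dict.mk vector).contains fw.1 then
        fw.2.foldl (fun d tw =>
          if d.contains tw.1 then d.insert tw.1 (d.getD tw.1 0 + tw.2 * (PySem.Dict.mk vector).getD fw.1 0) else d) d
      else d) (tagset.foldl (fun d tag => d.insert tag 0) (PySem.Dict.empty : PySem.Dict String Int))) := by
    apply PySem.Dict.ext
    rw [PySem.Dict.items_eq_map_keys _ hAnd 0, PySem.Dict.items_eq_map_keys _ hBnd 0,
      hAk, hBk]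
    apply List.map_congr_left
    intro t ht
    have hAval := hAv t (by rw [hAk]; exact ht)
    have hBval := hBv t
    have hcont : (tagset.foldl (fun d tag => d.insert tag 0) (PySem.Dict.empty : PySem.Dict String Int)).contains t = true := by
      rw [PySem.Dict.contains_eq_decide_mem_keys, hk0]
      exact decide_eq_true ht
    rw [hAval, hBval, hv0 t, hcont, if_pos rfl, zero_add,
      scoreA_eq_scoreSum vector weights t hw hsub]
  rw [hdicts]
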